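-- pv_equiv track=rewrite | github.com/hanvanderaa/semanticanomalydetection | code/labelparser/labelparser.py | vote_style
-- ===== SOURCE A (Python) =====
-- def tag_style(tag):
--     if tag in VOS:
--         return 'VOS'
--     elif tag in NA:
--         return 'NA'
--     elif tag in DES:
--         return 'DES'
--     elif tag in AN:
--         return 'AN'
--     else:
--         return ''
--
-- def vote_style(tags):
--     styles = {'VOS': 0, 'AN': 0, 'NA': 0, 'DES': 0}
--     for tag in tags:
--         try:
--             style = tag_style(tag)
--             styles[style] += 1
--         except:
--             pass
--     return max(styles, key=styles.get)
--
-- VOS = ['MODIFIERVOS', '3RDSPVOS', 'VOO', 'ADVOS', 'AND-VOS', 'C-VOS', 'VOV', 'misc-VOS', 'AD_VOS', 'MISC_VOS', 'OF-VOS',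
--        'VOIV', 'VOIO', 'OF_VERB-VOS', 'VOV-E']
--
-- AN = ['MODIFIERAN', '3RDSPAN', 'misc-AN', 'ADAN', 'AND-AN', 'OF-AN', 'C-AN', 'AN_OF', 'AD_AN', 'ANO', 'ANV', 'ANNO',
--       'ANNV', 'ANIO', 'ANIV', 'ANINGO', 'ANOV', 'ANINGV', 'ANOO', 'OF_VERB-AN']
--
-- NA = ['MODIFIERNA', '3RDSPNA', 'NAO', 'NAV', 'OF_NA', 'AND-NA', 'AD_NA', 'C-NA', 'misc-NA', 'OF-NA', 'ADNA',
--       'OF_VERB-NA', ]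
--
-- DES = ['MODIFIERDES', '3RDSPDES', 'OF-DES', 'misc-DES', 'AD_DES', 'AND-DES', 'ADDES', 'C-DES', 'DESV', 'DESO',
--        'OF_VERB-DES', 'DESV-P']
-- ===== SOURCE B (Python) =====
-- VOS = ['MODIFIERVOS', '3RDSPVOS', 'VOO', 'ADVOS', 'AND-VOS', 'C-VOS', 'VOV', 'misc-VOS', 'AD_VOS', 'MISC_VOS', 'OF-VOS',
--        'VOIV', 'VOIO', 'OF_VERB-VOS', 'VOV-E']
--
-- AN = ['MODIFIERAN', '3RDSPAN', 'misc-AN', 'ADAN', 'AND-AN', 'OF-AN', 'C-AN', 'AN_OF', 'AD_AN', 'ANO', 'ANV', 'ANNO',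
--       'ANNV', 'ANIO', 'ANIV', 'ANINGO', 'ANOV', 'ANINGV', 'ANOO', 'OF_VERB-AN']
--
-- NA = ['MODIFIERNA', '3RDSPNA', 'NAO', 'NAV', 'OF_NA', 'AND-NA', 'AD_NA', 'C-NA', 'misc-NA', 'OF-NA', 'ADNA',
--       'OF_VERB-NA', ]
--
-- DES = ['MODIFIERDES', '3RDSPDES', 'OF-DES', 'misc-DES', 'AD_DES', 'AND-DES', 'ADDES', 'C-DES', 'DESV', 'DESO',
--        'OF_VERB-DES', 'DESV-P']
--
-- def vote_style(tags):
--     tags = list(tags)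
--     counts = {
--         'VOS': sum(1 for t in tags if t in VOS),
--         'AN': sum(1 for t in tags if t in AN),
--         'NA': sum(1 for t in tags if t in NA),
--         'DES': sum(1 for t in tags if t in DES),
--     }
--     return max(counts, key=counts.get)
-- ===== Notes on version B (the rewrite author's own statement) =====
-- stated objective: simpler
-- what changed: A's single classifying pass (if/elif tag_style chain feeding a dict update inside try/except) is replaced by four independent membership-count scans that build the counts dict directly; tie-breaking is preserved by keeping the key order VOS, AN, NA, DES.
import Mathlib
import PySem

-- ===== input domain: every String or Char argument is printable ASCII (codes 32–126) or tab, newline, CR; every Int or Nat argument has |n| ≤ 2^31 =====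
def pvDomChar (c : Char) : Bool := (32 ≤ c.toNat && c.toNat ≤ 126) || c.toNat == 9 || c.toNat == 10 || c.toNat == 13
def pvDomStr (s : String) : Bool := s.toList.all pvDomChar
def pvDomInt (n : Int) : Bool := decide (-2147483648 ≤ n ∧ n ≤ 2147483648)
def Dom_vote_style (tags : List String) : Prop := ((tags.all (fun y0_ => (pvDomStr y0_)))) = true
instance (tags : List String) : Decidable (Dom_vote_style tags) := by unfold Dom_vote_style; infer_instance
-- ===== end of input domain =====

-- B replaces A's single classifying pass (if/elif chain + dict update under try/except) by four
-- independent per-category membership scans building the counts dict directly; objective: simpler.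

def VOS_list : List String := ["MODIFIERVOS", "3RDSPVOS", "VOO", "ADVOS", "AND-VOS", "C-VOS", "VOV", "misc-VOS", "AD_VOS", "MISC_VOS", "OF-VOS",
  "VOIV", "VOIO", "OF_VERB-VOS", "VOV-E"]

def AN_list : List String := ["MODIFIERAN", "3RDSPAN", "misc-AN", "ADAN", "AND-AN", "OF-AN", "C-AN", "AN_OF", "AD_AN", "ANO", "ANV", "ANNO",
  "ANNV", "ANIO", "ANIV", "ANINGO", "ANOV", "ANINGV", "ANOO", "OF_VERB-AN"]

def NA_list : List String := ["MODIFIERNA", "3RDSPNA", "NAO", "NAV", "OF_NA", "AND-NA", "AD_NA", "C-NA", "misc-NA", "OF-NA", "ADNA",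
  "OF_VERB-NA"]

def DES_list : List String := ["MODIFIERDES", "3RDSPDES", "OF-DES", "misc-DES", "AD_DES", "AND-DES", "ADDES", "C-DES", "DESV", "DESO",
  "OF_VERB-DES", "DESV-P"]

-- ===== PORT A =====
def tag_style (tag : String) : String :=
  if VOS_list.contains tag then "VOS"
  else if NA_list.contains tag then "NA"
  else if DES_list.contains tag then "DES"
  else if AN_list.contains tag then "AN"
  else ""

-- the loop body: 'styles[style] += 1' raises KeyError on a missing key, swallowed by 'except: pass'
def vote_style_step (d : PySem.Dict String Int) (tag : String) : PySem.Dict String Int :=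
  let style := tag_style tag
  match PySem.Dict.get? d style with
  | some v => PySem.Dict.insert d style (v + 1)
  | none => d

def vote_style (tags : List String) : String :=
  let styles := tags.foldl vote_style_step (PySem.Dict.ofList [("VOS", 0), ("AN", 0), ("NA", 0), ("DES", 0)])
  -- max(styles, key=styles.get): first key with maximal value; the dict is never empty, the none
  -- branch is an unreachable totalisation guard; styles.get k is exact as getD k 0 since k ∈ keys
  match PySem.List.max? (PySem.Dict.keys styles) (fun k => PySem.Dict.getD styles k 0) with
  | some s => s
  | none => ""

-- ===== PORT B =====
def vote_style_alt (tags : List String) : String :=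
  let counts : PySem.Dict String Int := PySem.Dict.ofList
    [("VOS", (tags.countP (fun t => VOS_list.contains t) : Int)),
     ("AN", (tags.countP (fun t => AN_list.contains t) : Int)),
     ("NA", (tags.countP (fun t => NA_list.contains t) : Int)),
     ("DES", (tags.countP (fun t => DES_list.contains t) : Int))]
  match PySem.List.max? (PySem.Dict.keys counts) (fun k => PySem.Dict.getD counts k 0) with
  | some s => s
  | none => ""

-- ===== PRECONDITION & SPEC =====
def Spec_vote_style (tags : List String) (out : String) : Prop := out = vote_style_alt tags
instance (tags : List String) (out : String) : Decidable (Spec_vote_style tags out) := by unfold Spec_vote_style; infer_instance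

-- ===== CLAIM (what is proved, stated in full; the proofs are below) =====
def Claim_equal_vote_style : Prop := ∀ (tags : List String), Dom_vote_style tags → Spec_vote_style tags (vote_style tags)

-- ===== LEMMAS AND PROOFS =====

-- loop invariant: A's classifying fold from any four starting counts adds the four membership counts
lemma vote_style_foldl (l : List String) (a b c d : Int) :
    l.foldl vote_style_step (PySem.Dict.ofList [("VOS", a), ("AN", b), ("NA", c), ("DES", d)])
      = PySem.Dict.ofList
          [("VOS", a + (l.countP (fun t => VOS_list.contains t) : Int)),
           ("AN", b + (l.countP (fun t => AN_list.contains t) : Int)),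
           ("NA", c + (l.countP (fun t => NA_list.contains t) : Int)),
           ("DES", d + (l.countP (fun t => DES_list.contains t) : Int))] := by
  induction l generalizing a b c d with
  | nil => simp
  | cons t l ih =>
    have hdisj : ∀ (xs ys : List String), (∀ s ∈ xs, s ∉ ys) → t ∈ xs → t ∉ ys := by
      intro xs ys h ht
      exact h t ht
    have step : vote_style_step (PySem.Dict.ofList [("VOS", a), ("AN", b), ("NA", c), ("DES", d)]) t
        = PySem.Dict.ofList
            [("VOS", a + if t ∈ VOS_list then 1 else 0),
             ("AN", b + if t ∈ AN_list then 1 else 0),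
             ("NA", c + if t ∈ NA_list then 1 else 0),
             ("DES", d + if t ∈ DES_list then 1 else 0)] := by
      by_cases hV : t ∈ VOS_list
      · have hA := hdisj VOS_list AN_list (by decide) hV
        have hN := hdisj VOS_list NA_list (by decide) hV
        have hD := hdisj VOS_list DES_list (by decide) hV
        simp [vote_style_step, tag_style, hV, hA, hN, hD, PySem.Dict.get?, PySem.Dict.insert, PySem.Dict.ofList, PySem.Dict.update, PySem.Dict.empty, PySem.Dict.contains]
      · by_cases hN : t ∈ NA_list
        · have hA := hdisj NA_list AN_list (by decide) hN
          have hD := hdisj NA_list DES_list (by decide) hN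
          simp [vote_style_step, tag_style, hV, hA, hN, hD, PySem.Dict.get?, PySem.Dict.insert, PySem.Dict.ofList, PySem.Dict.update, PySem.Dict.empty, PySem.Dict.contains]
        · by_cases hD : t ∈ DES_list
          · have hA := hdisj DES_list AN_list (by decide) hD
            simp [vote_style_step, tag_style, hV, hA, hN, hD, PySem.Dict.get?, PySem.Dict.insert, PySem.Dict.ofList, PySem.Dict.update, PySem.Dict.empty, PySem.Dict.contains]
          · by_cases hA : t ∈ AN_list
            · simp [vote_style_step, tag_style, hV, hA, hN, hD, PySem.Dict.get?, PySem.Dict.insert, PySem.Dict.ofList, PySem.Dict.update, PySem.Dict.empty, PySem.Dict.contains]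
            · have hget : (PySem.Dict.ofList [("VOS", a), ("AN", b), ("NA", c), ("DES", d)]).get? "" = none := by
                simp [PySem.Dict.ofList, PySem.Dict.update, PySem.Dict.get?, PySem.Dict.insert, PySem.Dict.empty, PySem.Dict.contains]
              simp [vote_style_step, tag_style, hV, hA, hN, hD, hget]
    rw [List.foldl_cons, step, ih]
    congr 1
    simp only [List.countP_cons, List.cons.injEq, Prod.mk.injEq, true_and, and_true]
    refine ⟨?_, ?_, ?_, ?_⟩
    · by_cases h : t ∈ VOS_list <;> simp [h, Int.add_comm, Int.add_assoc, Int.add_left_comm]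
    · by_cases h : t ∈ AN_list <;> simp [h, Int.add_comm, Int.add_assoc, Int.add_left_comm]
    · by_cases h : t ∈ NA_list <;> simp [h, Int.add_comm, Int.add_assoc, Int.add_left_comm]
    · by_cases h : t ∈ DES_list <;> simp [h, Int.add_comm, Int.add_assoc, Int.add_left_comm]

-- ===== VERDICT (by name: the statement is the Claim_ definition above) =====
theorem vote_style_spec : Claim_equal_vote_style := by
  intro tags _
  show vote_style tags = vote_style_alt tags
  unfold vote_style vote_style_alt
  rw [vote_style_foldl]
  simp
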